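-- pv_equiv track=rewrite | github.com/DariusAftan/spndix | ProiectDjango/spndix/views.py | luna_an_in_urma
-- ===== SOURCE A (Python) =====
-- def luna_an_in_urma(luna, an, luni):
--     luna_tinta = luna
--     an_tinta = an
--     pasi = max(int(luni or 0), 0)
--
--     for _ in range(pasi):
--         if luna_tinta == 1:
--             luna_tinta = 12
--             an_tinta -= 1
--         else:
--             luna_tinta -= 1
--
--     return luna_tinta, an_tinta
-- ===== SOURCE B (Python) =====
-- def luna_an_in_urma(luna, an, luni):
--     pasi = max(int(luni or 0), 0)
--     if 1 <= luna <= pasi: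
--         # the countdown crosses January: every further 12 steps is one more year
--         ani, rest = divmod(pasi - luna, 12)
--         return 12 - rest, an - 1 - ani
--     return luna - pasi, an
-- ===== Notes on version B (the rewrite author's own statement) =====
-- stated objective: faster
-- what changed: Replaced the O(luni) one-step-at-a-time countdown loop with an O(1) computation: when the countdown crosses January (1 <= luna <= pasi) a single divmod of the remaining steps by 12 gives the extra years and the final month directly; otherwise the month just counts down by pasi.
import Mathlib
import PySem

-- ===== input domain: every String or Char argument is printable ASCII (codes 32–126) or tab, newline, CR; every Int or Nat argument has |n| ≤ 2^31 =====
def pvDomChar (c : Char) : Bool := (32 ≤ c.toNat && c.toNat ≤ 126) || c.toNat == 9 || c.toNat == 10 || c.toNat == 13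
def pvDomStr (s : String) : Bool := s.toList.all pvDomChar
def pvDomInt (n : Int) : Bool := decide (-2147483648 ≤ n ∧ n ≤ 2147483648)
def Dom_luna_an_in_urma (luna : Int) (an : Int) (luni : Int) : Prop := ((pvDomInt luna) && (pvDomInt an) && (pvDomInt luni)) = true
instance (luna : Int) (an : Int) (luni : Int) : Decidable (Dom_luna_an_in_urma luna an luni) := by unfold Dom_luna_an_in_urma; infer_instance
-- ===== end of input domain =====

-- B replaces A's step-by-step month countdown loop with an O(1) divmod computation;
-- equal return value on all Int inputs (A is total on Int, so no Pre_).

-- ===== PORT A =====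
-- loop body of A's 'for _ in range(pasi)' as structural recursion on the step count
def luna_an_in_urma_loop : Nat → Int × Int → Int × Int
  | 0, s => s
  | n + 1, (m, y) => luna_an_in_urma_loop n (if m = 1 then (12, y - 1) else (m - 1, y))

def luna_an_in_urma (luna : Int) (an : Int) (luni : Int) : List Int :=
  -- pasi = max(int(luni or 0), 0); 'int(luni or 0)' is luni on every Int input
  let pasi : Int := max luni 0
  let r := luna_an_in_urma_loop pasi.toNat (luna, an)
  [r.1, r.2]

-- ===== PORT B =====
-- O(1): divmod(pasi - luna, 12) ported as (floordiv, mod), Python floor semantics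
def luna_an_in_urma_alt (luna : Int) (an : Int) (luni : Int) : List Int :=
  let pasi : Int := max luni 0
  if 1 ≤ luna ∧ luna ≤ pasi then
    let ani := PySem.Int.floordiv (pasi - luna) 12
    let rest := PySem.Int.mod (pasi - luna) 12
    [12 - rest, an - 1 - ani]
  else
    [luna - pasi, an]

-- ===== PRECONDITION & SPEC =====
def Spec_luna_an_in_urma (luna : Int) (an : Int) (luni : Int) (out : List Int) : Prop := out = luna_an_in_urma_alt luna an luni
instance (luna : Int) (an : Int) (luni : Int) (out : List Int) : Decidable (Spec_luna_an_in_urma luna an luni out) := by unfold Spec_luna_an_in_urma; infer_instance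

-- ===== CLAIM (what is proved, stated in full; the proofs are below) =====
def Claim_equal_luna_an_in_urma : Prop := ∀ (luna : Int) (an : Int) (luni : Int), Dom_luna_an_in_urma luna an luni → Spec_luna_an_in_urma luna an luni (luna_an_in_urma luna an luni)

-- ===== LEMMAS AND PROOFS =====
-- the loop's closed form for every integer start month
theorem luna_an_in_urma_loop_closed (n : Nat) (m y : Int) :
    luna_an_in_urma_loop n (m, y) =
      (if m ≤ 0 ∨ (n : Int) < m then (m - n, y)
       else (m - n + 12 * (((n : Int) - m) / 12 + 1), y - (((n : Int) - m) / 12 + 1))) := by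
  induction n generalizing m y with
  | zero =>
    simp only [luna_an_in_urma_loop, Nat.cast_zero]
    split_ifs <;> rw [Prod.mk.injEq] <;> constructor <;> omega
  | succ k ih =>
    rw [luna_an_in_urma_loop]
    by_cases h1 : m = 1
    · subst h1
      rw [if_pos rfl, ih 12 (y - 1)]
      have hdiv : ((k : Int)) / 12 = ((k : Int) - 12) / 12 + 1 := by
        have h := Int.add_mul_ediv_right ((k : Int) - 12) 1 (by norm_num : (12:Int) ≠ 0)
        simpa using h
      push_cast
      split_ifs <;> rw [Prod.mk.injEq] <;> constructor <;>
        first | omega | (simp_all only [false_or]; omega)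
    · rw [if_neg h1, ih (m - 1) y]
      push_cast
      split_ifs <;> rw [Prod.mk.injEq] <;> constructor <;> omega

-- ===== VERDICT (by name: the statement is the Claim_ definition above) =====
theorem luna_an_in_urma_spec : Claim_equal_luna_an_in_urma := by
  intro luna an luni _
  unfold Spec_luna_an_in_urma
  simp only [luna_an_in_urma, luna_an_in_urma_alt]
  rw [luna_an_in_urma_loop_closed]
  rw [PySem.Int.floordiv_eq_ediv_of_pos (by norm_num),
      PySem.Int.mod_eq_emod_of_pos (by norm_num)]
  have h0 : (0:Int) ≤ max luni 0 := le_max_right _ _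
  rw [Int.toNat_of_nonneg h0]
  split_ifs <;> simp only [List.cons.injEq, and_true] <;> constructor <;> omega
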